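-- pv_equiv track=rewrite | github.com/jina47/Algorithm_TIL | 최고의 집합.py | solution
-- ===== SOURCE A (Python) =====
-- def solution(n, s):
--     if s // n < 1:
--         return [-1]
--     else:
--         k = s // n
--         if s % n == 0:
--             return [k for _ in range(n)]
--         else:
--             lst = []
--             m = n
--             while len(lst) != n:
--                 lst.append(k)
--                 s -= k
--                 m -= 1
--                 if m == 0:
--                     break
--                 k = s // m
--             return lst
-- ===== SOURCE B (Python) =====
-- def solution(n, s):
--     q, r = divmod(s, n)
--     if q < 1:
--         return [-1]
--     return [q] * (n - r) + [q + 1] * r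
-- ===== Notes on version B (the rewrite author's own statement) =====
-- stated objective: simpler
-- what changed: Replaces the greedy floor-division loop (recomputing s//m at every step) with the closed form from one divmod: n-r copies of q followed by r copies of q+1.
import Mathlib
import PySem

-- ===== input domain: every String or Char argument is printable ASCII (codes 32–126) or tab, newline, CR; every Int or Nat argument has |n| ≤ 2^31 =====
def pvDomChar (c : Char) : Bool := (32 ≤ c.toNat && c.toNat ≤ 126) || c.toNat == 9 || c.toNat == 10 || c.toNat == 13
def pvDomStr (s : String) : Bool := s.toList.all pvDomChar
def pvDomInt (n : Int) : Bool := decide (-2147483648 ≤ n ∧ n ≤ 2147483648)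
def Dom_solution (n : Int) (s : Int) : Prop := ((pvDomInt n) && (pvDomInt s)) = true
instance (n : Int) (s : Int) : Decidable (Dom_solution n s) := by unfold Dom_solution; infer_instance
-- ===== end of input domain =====

-- B replaces A's greedy floor-division loop by the closed form [q]*(n-r) ++ [q+1]*r from divmod(s, n): simpler, no loop state.

-- ===== PORT A =====
-- the while-loop of A; for n > 0 it performs exactly n iterations, so fuel n.toNat is exact
def solutionLoop (fuel : Nat) (n : Int) (lst : List Int) (s : Int) (k : Int) (m : Int) : List Int :=
  match fuel with
  | 0 => lst
  | Nat.succ fuel' =>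
    if (lst.length : Int) ≠ n then
      let lst' := lst ++ [k]
      let s' := s - k
      let m' := m - 1
      if m' = 0 then lst'
      else solutionLoop fuel' n lst' s' (PySem.Int.floordiv s' m') m'
    else lst

def solution (n : Int) (s : Int) : List Int :=
  if PySem.Int.floordiv s n < 1 then [-1]
  else
    let k := PySem.Int.floordiv s n
    if PySem.Int.mod s n = 0 then
      (PySem.List.pyRange 0 n 1).map (fun _ => k)
    else
      solutionLoop n.toNat n [] s k n

-- ===== PORT B =====
def solution_alt (n : Int) (s : Int) : List Int :=
  match PySem.Int.divmod? s n with
  | none => []   -- n = 0: Python raises ZeroDivisionError; excluded by Pre_solution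
  | some (q, r) =>
    if q < 1 then [-1]
    else List.replicate (n - r).toNat q ++ List.replicate r.toNat (q + 1)

-- ===== PRECONDITION & SPEC =====
-- Pre_ excludes n = 0 (both Pythons raise ZeroDivisionError) and n < 0 with s // n ≥ 1 and
-- s % n ≠ 0, where A's while-loop never terminates (m only decreases below 0); A returns on
-- everything Pre_ admits.
def Pre_solution (n : Int) (s : Int) : Prop :=
  n ≠ 0 ∧ (0 < n ∨ PySem.Int.floordiv s n < 1 ∨ PySem.Int.mod s n = 0)
instance (n : Int) (s : Int) : Decidable (Pre_solution n s) := by unfold Pre_solution; infer_instance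
def pvWitness_solution : Int × Int := (3, 7)

def Spec_solution (n : Int) (s : Int) (out : List Int) : Prop := out = solution_alt n s
instance (n : Int) (s : Int) (out : List Int) : Decidable (Spec_solution n s out) := by unfold Spec_solution; infer_instance

-- ===== CLAIM (what is proved, stated in full; the proofs are below) =====
def Claim_equal_solution : Prop := ∀ (n : Int) (s : Int), Dom_solution n s → Pre_solution n s → Spec_solution n s (solution n s)

-- ===== LEMMAS AND PROOFS =====

-- the loop, started with m > 0 elements still to produce and k = s // m, yields
-- (m - s % m) copies of s // m followed by (s % m) copies of s // m + 1
theorem solutionLoop_closed (m : Nat) (hm : 0 < m) :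
    ∀ (s : Int) (lst : List Int) (n : Int), (lst.length : Int) + (m : Int) = n →
    solutionLoop m n lst s (PySem.Int.floordiv s (m : Int)) (m : Int) =
      lst ++ List.replicate (m - (PySem.Int.mod s (m : Int)).toNat) (PySem.Int.floordiv s (m : Int))
          ++ List.replicate (PySem.Int.mod s (m : Int)).toNat (PySem.Int.floordiv s (m : Int) + 1) := by
  induction m with
  | zero => omega
  | succ m' ih =>
    intro s lst n hlen
    have hmpos : (0 : Int) < ((m' + 1 : Nat) : Int) := by exact_mod_cast hm
    have hq := PySem.Int.floordiv_eq_ediv_of_pos (a := s) hmpos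
    have hr := PySem.Int.mod_eq_emod_of_pos (a := s) hmpos
    set q := PySem.Int.floordiv s ((m' + 1 : Nat) : Int) with hqdef
    set r := PySem.Int.mod s ((m' + 1 : Nat) : Int) with hrdef
    have hr0 : 0 ≤ r := by rw [hr]; exact Int.emod_nonneg s (by omega)
    have hrlt : r < ((m' + 1 : Nat) : Int) := by rw [hr]; exact Int.emod_lt_of_pos s hmpos
    have hsum : q * ((m' + 1 : Nat) : Int) + r = s := PySem.Int.floordiv_mul_add_mod s _
    have hne : ((lst.length : Int)) ≠ n := by omega
    by_cases hm0 : m' = 0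
    · subst hm0
      have : r = 0 := by omega
      simp [solutionLoop, hne, this]
    · have hm'pos : (0 : Int) < (m' : Int) := by omega
      have hm'ne : ((m' : Int)) ≠ 0 := by omega
      have hstep : ((m' + 1 : Nat) : Int) - 1 = (m' : Int) := by push_cast; ring
      have hrec :
          solutionLoop (m' + 1) n lst s q ((m' + 1 : Nat) : Int) =
            solutionLoop m' n (lst ++ [q]) (s - q) (PySem.Int.floordiv (s - q) (m' : Int)) (m' : Int) := by
        conv_lhs => rw [solutionLoop]
        rw [if_pos hne]
        simp only [hstep]
        rw [if_neg hm'ne]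
      rw [hrec, ih (by omega) (s - q) (lst ++ [q]) n (by push_cast at hlen ⊢; simp; omega)]
      have hq' := PySem.Int.floordiv_eq_ediv_of_pos (a := s - q) hm'pos
      have hr' := PySem.Int.mod_eq_emod_of_pos (a := s - q) hm'pos
      by_cases hcase : r < (m' : Int)
      · -- remainder unchanged: s - q = q * m' + r with 0 ≤ r < m'
        have huniq := (Int.ediv_emod_unique'' (a := s - q) (b := (m' : Int)) (q := q) (r := r) hm'ne).mpr
          ⟨by push_cast at hsum ⊢; ring_nf; ring_nf at hsum; linarith, hr0, by rwa [abs_of_pos hm'pos]⟩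
        have hqv : PySem.Int.floordiv (s - q) (m' : Int) = q := by rw [hq']; exact huniq.1
        have hrv : PySem.Int.mod (s - q) (m' : Int) = r := by rw [hr']; exact huniq.2
        rw [hqv, hrv]
        have h1 : (m' + 1) - r.toNat = (m' - r.toNat) + 1 := by omega
        rw [h1, List.replicate_succ]
        simp [List.append_assoc]
      · -- r = m': quotient becomes q + 1, remainder 0
        have hreq : r = (m' : Int) := by omega
        have huniq := (Int.ediv_emod_unique'' (a := s - q) (b := (m' : Int)) (q := q + 1) (r := 0) hm'ne).mpr
          ⟨by push_cast at hsum ⊢; ring_nf; ring_nf at hsum; linarith, le_refl 0, by rw [abs_of_pos hm'pos]; omega⟩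
        have hqv : PySem.Int.floordiv (s - q) (m' : Int) = q + 1 := by rw [hq']; exact huniq.1
        have hrv : PySem.Int.mod (s - q) (m' : Int) = 0 := by rw [hr']; exact huniq.2
        rw [hqv, hrv]
        have h1 : (m' + 1) - r.toNat = 1 := by omega
        have h2 : r.toNat = m' := by omega
        simp [h2, List.append_assoc]

theorem solution_spec : Claim_equal_solution := by
  intro n s _ hpre
  unfold Spec_solution solution solution_alt
  obtain ⟨hn, hcase⟩ := hpre
  have hdm : PySem.Int.divmod? s n = some (PySem.Int.floordiv s n, PySem.Int.mod s n) := by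
    simp [PySem.Int.divmod?, PySem.Int.floordiv, PySem.Int.mod, hn]
  rw [hdm]
  set q := PySem.Int.floordiv s n with hq
  set r := PySem.Int.mod s n with hr
  by_cases h1 : q < 1
  · simp [h1]
  · rw [if_neg h1]
    simp only [if_neg h1]
    by_cases h2 : r = 0
    · rw [if_pos h2]
      rw [PySem.List.pyRange_one]
      simp [h2, Function.comp_def, List.map_const']
    · rw [if_neg h2]
      have hnpos : 0 < n := by tauto
      have hrpos : 0 ≤ r ∧ r < n := by
        rw [hr, PySem.Int.mod_eq_emod_of_pos hnpos]
        exact ⟨Int.emod_nonneg s (by omega), Int.emod_lt_of_pos s hnpos⟩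
      have hcast : ((n.toNat : Nat) : Int) = n := Int.toNat_of_nonneg (le_of_lt hnpos)
      have := solutionLoop_closed n.toNat (by omega) s [] n (by simp [hcast])
      rw [hcast] at this
      rw [this]
      have h3 : (n - r).toNat = n.toNat - r.toNat := by omega
      rw [← hq, ← hr, h3]
      simp
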